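-- pv_equiv track=rewrite | github.com/VeteraNovis/bulk-file-renamer | renamer.py | checkRestricted
-- ===== SOURCE A (Python) =====
-- def checkRestricted(fName):
--     # List of restricted filenames
--     rNames = [
--         'AUX', 'PRN', 'NUL', 'CON', 'COM0', 'COM1', 'COM2', 'COM3', 'COM4',
--         'COM5', 'COM6', 'COM7', 'COM8', 'COM9', 'LPT0', 'LPT1', 'LPT2', 'LPT3',
--         'LPT4', 'LPT5', 'LPT6', 'LPT7', 'LPT8', 'LPT9', '.lock', 'desktop.ini',
--         '_vti_'
--     ]
--
--     if fName in rNames or '_vti_' in fName: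
--         fName = fName + "-renamed"
--
--     # Replacing or deleting restricted characters
--     rChars = [['?', ''], ['*', ''], ['<', ''],
--               ['>', ''], ['|', ''], [r':', '-'],
--               ['\"', '\''], ['\\', '.'], ['/', '.']]
--     for entry in rChars:
--         fName = fName.replace(entry[0], entry[1])
--
--     return fName
-- ===== SOURCE B (Python) =====
-- _RESTRICTED = {
--     'AUX', 'PRN', 'NUL', 'CON', 'COM0', 'COM1', 'COM2', 'COM3', 'COM4',
--     'COM5', 'COM6', 'COM7', 'COM8', 'COM9', 'LPT0', 'LPT1', 'LPT2', 'LPT3',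
--     'LPT4', 'LPT5', 'LPT6', 'LPT7', 'LPT8', 'LPT9', '.lock', 'desktop.ini',
--     '_vti_'
-- }
--
-- _TABLE = str.maketrans({'?': None, '*': None, '<': None, '>': None, '|': None,
--                         ':': '-', '"': "'", '\\': '.', '/': '.'})
--
--
-- def checkRestricted(fName):
--     if fName in _RESTRICTED or '_vti_' in fName:
--         fName += "-renamed"
--     return fName.translate(_TABLE)
-- ===== Notes on version B (the rewrite author's own statement) =====
-- stated objective: idiomatic
-- what changed: Replaced the nine sequential str.replace scans with a single str.translate pass over one maketrans table, and the restricted-name list with a set.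
import Mathlib
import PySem

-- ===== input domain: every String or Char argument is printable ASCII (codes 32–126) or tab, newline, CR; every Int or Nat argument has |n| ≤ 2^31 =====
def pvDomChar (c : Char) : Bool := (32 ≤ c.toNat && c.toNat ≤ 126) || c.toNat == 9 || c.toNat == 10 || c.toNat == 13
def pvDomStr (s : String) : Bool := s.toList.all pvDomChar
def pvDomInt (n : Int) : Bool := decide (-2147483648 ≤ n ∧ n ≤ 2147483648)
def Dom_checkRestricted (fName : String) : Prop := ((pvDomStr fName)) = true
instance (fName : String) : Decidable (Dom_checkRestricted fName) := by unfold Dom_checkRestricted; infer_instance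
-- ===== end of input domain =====

-- B replaces the nine sequential str.replace passes with one table-driven str.translate pass
-- (and a set for the restricted-name guard): idiomatic, single traversal. Return value only; neither mutates.

-- ===== PORT A =====
-- list of restricted filenames
def rNames : List String :=
  ["AUX", "PRN", "NUL", "CON", "COM0", "COM1", "COM2", "COM3", "COM4",
   "COM5", "COM6", "COM7", "COM8", "COM9", "LPT0", "LPT1", "LPT2", "LPT3",
   "LPT4", "LPT5", "LPT6", "LPT7", "LPT8", "LPT9", ".lock", "desktop.ini",
   "_vti_"]

-- replacement pairs, in A's order
def rChars : List (String × String) :=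
  [("?", ""), ("*", ""), ("<", ""), (">", ""), ("|", ""),
   (":", "-"), ("\"", "'"), ("\\", "."), ("/", ".")]

def checkRestricted (fName : String) : String :=
  let fName := if rNames.contains fName || PySem.Str.isIn "_vti_" fName
               then fName ++ "-renamed" else fName
  rChars.foldl (fun s entry => PySem.Str.replace s entry.1 entry.2) fName

-- ===== PORT B =====
-- the restricted names, as a Python set
def restrictedSet : PySem.Set String :=
  PySem.Set.ofList
    ["AUX", "PRN", "NUL", "CON", "COM0", "COM1", "COM2", "COM3", "COM4",
     "COM5", "COM6", "COM7", "COM8", "COM9", "LPT0", "LPT1", "LPT2", "LPT3",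
     "LPT4", "LPT5", "LPT6", "LPT7", "LPT8", "LPT9", ".lock", "desktop.ini",
     "_vti_"]

-- the translation table built by str.maketrans, as a per-character mapping
def trChar (c : Char) : List Char :=
  if c = '?' ∨ c = '*' ∨ c = '<' ∨ c = '>' ∨ c = '|' then []
  else if c = ':' then ['-']
  else if c = '"' then ['\'']
  else if c = '\\' ∨ c = '/' then ['.']
  else [c]

def checkRestricted_alt (fName : String) : String :=
  let fName := if PySem.Set.contains restrictedSet fName || PySem.Str.isIn "_vti_" fName
               then fName ++ "-renamed" else fName
  String.ofList (fName.toList.flatMap trChar)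

-- ===== PRECONDITION & SPEC =====
def Spec_checkRestricted (fName : String) (out : String) : Prop := out = checkRestricted_alt fName
instance (fName : String) (out : String) : Decidable (Spec_checkRestricted fName out) := by unfold Spec_checkRestricted; infer_instance

-- ===== CLAIM (what is proved, stated in full; the proofs are below) =====
def Claim_equal_checkRestricted : Prop := ∀ (fName : String), Dom_checkRestricted fName → Spec_checkRestricted fName (checkRestricted fName)

-- ===== LEMMAS AND PROOFS =====

-- replace.go with a single-character pattern, characterised as a flatMap
lemma go_single (o : Char) (new : List Char) (l : List Char) :
    ∀ (fuel : Nat) (acc : List Char), l.length ≤ fuel →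
    PySem.Chars.replace.go [o] new fuel l acc
      = acc.reverse ++ l.flatMap (fun c => if c = o then new else [c]) := by
  induction l with
  | nil =>
    intro fuel acc _
    cases fuel <;> simp [PySem.Chars.replace.go]
  | cons c t ih =>
    intro fuel acc hle
    cases fuel with
    | zero => simp at hle
    | succ f =>
      rw [PySem.Chars.replace.go]
      by_cases h : c = o
      · subst h
        simp [List.isPrefixOf, ih f _ (by simpa using hle)]
      · have hp : [o].isPrefixOf (c :: t) = false := by
          simp [List.isPrefixOf]; exact fun e => absurd e.symm h
        simp [hp, ih f _ (by simpa using hle), h]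

-- str.replace with a single-character pattern is a per-character flatMap
lemma replace_single (l : List Char) (o : Char) (new : List Char) :
    PySem.Chars.replace l [o] new = l.flatMap (fun c => if c = o then new else [c]) := by
  rw [PySem.Chars.replace]
  simp [go_single o new l l.length [] le_rfl]

-- the nine successive single-character replaces collapse to one trChar pass
lemma chain (l : List Char) :
    ((((((((l.flatMap (fun c => if c = '?' then [] else [c])).flatMap
       (fun c => if c = '*' then [] else [c])).flatMap
       (fun c => if c = '<' then [] else [c])).flatMap
       (fun c => if c = '>' then [] else [c])).flatMap
       (fun c => if c = '|' then [] else [c])).flatMap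
       (fun c => if c = ':' then ['-'] else [c])).flatMap
       (fun c => if c = '"' then ['\''] else [c])).flatMap
       (fun c => if c = '\\' then ['.'] else [c])).flatMap
       (fun c => if c = '/' then ['.'] else [c])
      = l.flatMap trChar := by
  simp only [List.flatMap_assoc]
  refine List.flatMap_congr fun c _ => ?_
  by_cases h1 : c = '?'; · subst h1; rfl
  by_cases h2 : c = '*'; · subst h2; rfl
  by_cases h3 : c = '<'; · subst h3; rfl
  by_cases h4 : c = '>'; · subst h4; rfl
  by_cases h5 : c = '|'; · subst h5; rfl
  by_cases h6 : c = ':'; · subst h6; rfl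
  by_cases h7 : c = '"'; · subst h7; rfl
  by_cases h8 : c = '\\'; · subst h8; rfl
  by_cases h9 : c = '/'; · subst h9; rfl
  simp [trChar, h1, h2, h3, h4, h5, h6, h7, h8, h9]

-- A's replacement fold equals B's single translate pass, for any start string
lemma foldl_rChars (s : String) :
    rChars.foldl (fun s entry => PySem.Str.replace s entry.1 entry.2) s
      = String.ofList (s.toList.flatMap trChar) := by
  simp only [rChars, List.foldl_cons, List.foldl_nil, PySem.Str.replace,
    String.toList_ofList]
  simp only [show ("?" : String).toList = ['?'] from rfl,
    show ("*" : String).toList = ['*'] from rfl,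
    show ("<" : String).toList = ['<'] from rfl,
    show (">" : String).toList = ['>'] from rfl,
    show ("|" : String).toList = ['|'] from rfl,
    show (":" : String).toList = [':'] from rfl,
    show ("-" : String).toList = ['-'] from rfl,
    show ("\"" : String).toList = ['"'] from rfl,
    show ("'" : String).toList = ['\''] from rfl,
    show ("\\" : String).toList = ['\\'] from rfl,
    show ("." : String).toList = ['.'] from rfl,
    show ("/" : String).toList = ['/'] from rfl,
    show ("" : String).toList = ([] : List Char) from rfl]
  simp only [replace_single]
  rw [chain]

-- the set of restricted names holds exactly A's list
lemma restrictedSet_eq : restrictedSet = rNames := by decide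

-- ===== VERDICT (by name: the statement is the Claim_ definition above) =====
theorem checkRestricted_spec : Claim_equal_checkRestricted := by
  intro fName _
  unfold Spec_checkRestricted checkRestricted checkRestricted_alt
  rw [restrictedSet_eq]
  exact foldl_rChars _
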